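-- pv_equiv track=rewrite | github.com/MFGangP/python-codingtest-2023 | 2025/8m2w/IM/0812/01_increase_candies.py | eat_candies
-- ===== SOURCE A (Python) =====
-- def eat_candies(candies):
--     eat_times = 0
--     # 상자는 최소 1, 2, 3개의 사탕이 있어야한다.
--     if candies[2] < 3 or candies[1] < 2 or candies[0] < 1:
--         return -1
--     else:
--         while candies[1] >= candies[2]:
--             candies[1] -= 1
--             eat_times += 1
--         while candies[0] >= candies[1]:
--             candies[0] -= 1
--             eat_times += 1
--         return eat_times
-- ===== SOURCE B (Python) =====
-- def eat_candies(candies):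
--     c0, c1, c2 = candies[0], candies[1], candies[2]
--     if c2 < 3 or c1 < 2 or c0 < 1:
--         return -1
--     # each loop's iteration count, computed in closed form
--     eat1 = max(0, c1 - (c2 - 1))
--     c1 = min(c1, c2 - 1)
--     return eat1 + max(0, c0 - (c1 - 1))
-- ===== Notes on version B (the rewrite author's own statement) =====
-- stated objective: alternative
-- what changed: replaces the two value-counting while loops by closed-form arithmetic (max/min) giving each loop's iteration count directly; B does not mutate the input list
import Mathlib
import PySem

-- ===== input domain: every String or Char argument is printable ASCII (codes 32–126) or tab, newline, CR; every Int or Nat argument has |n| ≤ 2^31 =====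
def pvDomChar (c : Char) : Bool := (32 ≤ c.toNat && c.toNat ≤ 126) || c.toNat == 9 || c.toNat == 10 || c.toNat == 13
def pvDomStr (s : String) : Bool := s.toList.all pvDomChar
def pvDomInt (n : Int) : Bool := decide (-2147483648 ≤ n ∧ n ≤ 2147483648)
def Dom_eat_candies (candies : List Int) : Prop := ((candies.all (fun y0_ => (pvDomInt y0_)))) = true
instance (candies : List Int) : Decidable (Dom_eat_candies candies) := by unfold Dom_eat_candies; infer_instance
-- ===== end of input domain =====

-- B replaces the two value-counting while loops by closed-form max/min arithmetic (a different algorithm, not measured faster);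
-- A mutates its argument list in place, B does not: equivalence here is about the return value only.


-- ===== PORT A =====
-- while b >= c: b -= 1; eat += 1   (returns final b and eat count)
def eatLoop (b c eat : Int) : Int × Int :=
  if b ≥ c then eatLoop (b - 1) c (eat + 1) else (b, eat)
termination_by (b - c + 1).toNat
decreasing_by
  have : b ≥ c := by assumption
  omega

def eat_candies (candies : List Int) : Int :=
  -- Pre_ guarantees indices 0..2 exist; getD 0 is only a totalization outside Pre_
  let c2 := PySem.List.pyGetD candies 2 0
  let c1 := PySem.List.pyGetD candies 1 0
  let c0 := PySem.List.pyGetD candies 0 0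
  if c2 < 3 ∨ c1 < 2 ∨ c0 < 1 then -1
  else
    let r1 := eatLoop c1 c2 0
    let r2 := eatLoop c0 r1.1 r1.2
    r2.2

-- ===== PORT B =====
def eat_candies_alt (candies : List Int) : Int :=
  let c0 := PySem.List.pyGetD candies 0 0
  let c1 := PySem.List.pyGetD candies 1 0
  let c2 := PySem.List.pyGetD candies 2 0
  if c2 < 3 ∨ c1 < 2 ∨ c0 < 1 then -1
  else
    let eat1 := max 0 (c1 - (c2 - 1))
    let c1' := min c1 (c2 - 1)
    eat1 + max 0 (c0 - (c1' - 1))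

-- ===== PRECONDITION & SPEC =====
-- Pre_ excludes lists of length < 3, on which A raises IndexError.
def Pre_eat_candies (candies : List Int) : Prop := 3 ≤ candies.length
instance (candies : List Int) : Decidable (Pre_eat_candies candies) := by unfold Pre_eat_candies; infer_instance
def pvWitness_eat_candies : List Int := [5, 4, 3]

def Spec_eat_candies (candies : List Int) (out : Int) : Prop := out = eat_candies_alt candies
instance (candies : List Int) (out : Int) : Decidable (Spec_eat_candies candies out) := by unfold Spec_eat_candies; infer_instance

-- ===== CLAIM (what is proved, stated in full; the proofs are below) =====
def Claim_equal_eat_candies : Prop := ∀ (candies : List Int), Dom_eat_candies candies → Pre_eat_candies candies → Spec_eat_candies candies (eat_candies candies)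

-- ===== LEMMAS AND PROOFS =====
theorem eatLoop_closed (b c eat : Int) : eatLoop b c eat = (min b (c - 1), eat + max 0 (b - c + 1)) := by
  fun_induction eatLoop b c eat with
  | case1 b eat h ih =>
      rw [ih, Prod.mk.injEq]
      constructor <;> omega
  | case2 b eat h =>
      rw [Prod.mk.injEq]
      constructor <;> omega

-- ===== VERDICT (by name: the statement is the Claim_ definition above) =====
theorem eat_candies_spec : Claim_equal_eat_candies := by
  intro candies _ _
  unfold Spec_eat_candies eat_candies eat_candies_alt
  simp only [eatLoop_closed]
  split_ifs with h
  · rcases h with h | h | h <;> simp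
  · push Not at h
    omega
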